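-- pv_equiv track=rewrite | github.com/stodd1031/CompressionResearch | not useful/varWithRep.py | getDiffLeftArrRec
-- ===== SOURCE A (Python) =====
-- mod = 256
--
-- def getDiffLeftArrRec(arr, outArr):
--     newArr = []
--     for index in range(0, len(arr)-1):
--         diff = arr[index+1] - arr[index]
--         if (diff < 0):
--             diff = mod + diff
--         newArr.append(diff)
--     outArr.append(newArr[0])
--     if (len(arr) == 2):
--         return outArr
--     else:
--         return getDiffLeftArrRec(newArr, outArr)
-- ===== SOURCE B (Python) =====
-- def getDiffLeftArrRec(arr, outArr):
--     # Iterative: repeatedly replace arr by its row of mod-256 forward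
--     # differences (built by zipping arr with its tail), collecting the
--     # first element of each row.  Mutates outArr like A does.
--     while True:
--         newArr = [b - a + 256 if b - a < 0 else b - a for a, b in zip(arr, arr[1:])]
--         outArr.append(newArr[0])
--         if len(arr) == 2:
--             return outArr
--         arr = newArr
-- ===== Notes on version B (the rewrite author's own statement) =====
-- stated objective: alternative
-- what changed: Tail recursion flattened into a while-True loop, and the indexed for-loop building each difference row replaced by a zip(arr, arr[1:]) comprehension.
import Mathlib
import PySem

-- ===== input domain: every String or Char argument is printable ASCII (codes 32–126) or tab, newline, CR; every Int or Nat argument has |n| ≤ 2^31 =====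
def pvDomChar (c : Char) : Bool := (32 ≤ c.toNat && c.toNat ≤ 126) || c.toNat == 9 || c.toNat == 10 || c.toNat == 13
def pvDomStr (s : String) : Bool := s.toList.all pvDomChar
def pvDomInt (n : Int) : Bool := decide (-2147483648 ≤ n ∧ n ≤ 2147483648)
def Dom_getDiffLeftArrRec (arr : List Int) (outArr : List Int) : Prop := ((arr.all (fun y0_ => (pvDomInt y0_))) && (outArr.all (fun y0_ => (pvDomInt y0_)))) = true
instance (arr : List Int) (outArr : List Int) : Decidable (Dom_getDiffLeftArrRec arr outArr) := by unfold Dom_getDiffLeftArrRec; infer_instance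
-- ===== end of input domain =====

-- B flattens A's tail recursion into a loop and builds each difference row by zipping
-- arr with its tail instead of indexing (objective: alternative). Both programs also
-- append to outArr in place; the equivalence proved here is about the return value.


-- ===== PORT A =====
-- termination helper: the row of forward differences is one shorter than arr
theorem pvFoldSnocMap (f : Nat → Int) (l : List Nat) (init : List Int) :
    l.foldl (fun acc i => acc ++ [f i]) init = init ++ l.map f := by
  induction l generalizing init with
  | nil => simp
  | cons x xs ih => simp [List.foldl, ih]

-- literal port of A: build newArr by an indexed loop, append newArr[0], recurse.
-- (arr[index] / arr[index+1] are always in range for index < len-1, so getD 0 is exact;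
--  the `arr.length ≤ 2` branch only makes the recursion total — Python raises for len < 2,
--  excluded by Pre_.)
def getDiffLeftArrRec (arr : List Int) (outArr : List Int) : List Int :=
  let newArr := (List.range (arr.length - 1)).foldl
    (fun acc index =>
      let diff := arr.getD (index + 1) 0 - arr.getD index 0
      acc ++ [if diff < 0 then 256 + diff else diff]) []
  let outArr' := outArr ++ [newArr.headD 0]
  if arr.length ≤ 2 then outArr'
  else getDiffLeftArrRec newArr outArr'
termination_by arr.length
decreasing_by
  simp only [pvFoldSnocMap, List.nil_append, List.length_map, List.length_range]
  omega

-- ===== PORT B =====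
-- B's row: zip arr with its tail and map the mod-256 difference
def pvDiffRow (arr : List Int) : List Int :=
  (arr.zip arr.tail).map (fun p => if p.2 - p.1 < 0 then p.2 - p.1 + 256 else p.2 - p.1)

-- B's while-True loop (same totality guard; Python raises for len < 2, excluded by Pre_)
def getDiffLeftArrRec_alt (arr : List Int) (outArr : List Int) : List Int :=
  let newArr := pvDiffRow arr
  let outArr' := outArr ++ [newArr.headD 0]
  if arr.length ≤ 2 then outArr'
  else getDiffLeftArrRec_alt newArr outArr'
termination_by arr.length
decreasing_by
  simp only [pvDiffRow, List.length_map, List.length_zip, List.length_tail]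
  omega

-- ===== PRECONDITION & SPEC =====
-- Pre_ excludes arrays of length < 2, on which both Pythons raise IndexError (newArr[0]).
def Pre_getDiffLeftArrRec (arr : List Int) (outArr : List Int) : Prop := 2 ≤ arr.length
instance (arr : List Int) (outArr : List Int) : Decidable (Pre_getDiffLeftArrRec arr outArr) := by unfold Pre_getDiffLeftArrRec; infer_instance
def pvWitness_getDiffLeftArrRec : List Int × List Int := ([3, 1, 7], [9])

def Spec_getDiffLeftArrRec (arr : List Int) (outArr : List Int) (out : List Int) : Prop := out = getDiffLeftArrRec_alt arr outArr
instance (arr : List Int) (outArr : List Int) (out : List Int) : Decidable (Spec_getDiffLeftArrRec arr outArr out) := by unfold Spec_getDiffLeftArrRec; infer_instance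

-- ===== CLAIM (what is proved, stated in full; the proofs are below) =====
def Claim_equal_getDiffLeftArrRec : Prop := ∀ (arr : List Int) (outArr : List Int), Dom_getDiffLeftArrRec arr outArr → Pre_getDiffLeftArrRec arr outArr → Spec_getDiffLeftArrRec arr outArr (getDiffLeftArrRec arr outArr)

-- ===== LEMMAS AND PROOFS =====

-- A's indexed row equals B's zip row
theorem pvRow_eq (arr : List Int) :
    (List.range (arr.length - 1)).foldl
      (fun acc index =>
        let diff := arr.getD (index + 1) 0 - arr.getD index 0
        acc ++ [if diff < 0 then 256 + diff else diff]) [] = pvDiffRow arr := by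
  rw [pvFoldSnocMap]
  simp only [List.nil_append, pvDiffRow]
  apply List.ext_getElem
  · simp [List.length_zip, List.length_tail]
  · intro i h1 h2
    simp only [List.length_map, List.length_range] at h1
    simp [List.getElem_zip, List.getElem_tail, List.getD_eq_getElem?_getD,
          List.getElem?_eq_getElem (by omega : i < arr.length),
          List.getElem?_eq_getElem (by omega : i + 1 < arr.length)]
    split_ifs <;> ring

theorem pvPorts_eq (arr outArr : List Int) :
    getDiffLeftArrRec arr outArr = getDiffLeftArrRec_alt arr outArr := by
  induction arr, outArr using getDiffLeftArrRec_alt.induct with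
  | case1 arr outArr h =>
    rw [getDiffLeftArrRec, getDiffLeftArrRec_alt]
    simp only [pvRow_eq, if_pos h]
  | case2 arr outArr _ _ h ih =>
    rw [getDiffLeftArrRec, getDiffLeftArrRec_alt]
    simp only [pvRow_eq, if_neg h]
    exact ih

-- ===== VERDICT (by name: the statement is the Claim_ definition above) =====
theorem getDiffLeftArrRec_spec : Claim_equal_getDiffLeftArrRec := by
  intro arr outArr _ _
  unfold Spec_getDiffLeftArrRec
  exact pvPorts_eq arr outArr
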